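-- pv_equiv track=rewrite | github.com/aswa2212/Career-Guidance- | career-tracking-backend/populate_complete_system.py | get_career_field
-- ===== SOURCE A (Python) =====
-- def get_career_field(career_name: str) -> str:
--     """Map career name to field"""
--     career_lower = career_name.lower()
--
--     if any(word in career_lower for word in ['software', 'developer', 'programmer', 'engineer']):
--         return 'Technology'
--     elif any(word in career_lower for word in ['data', 'analyst', 'scientist']):
--         return 'Data Science'
--     elif any(word in career_lower for word in ['manager', 'lead', 'director']):
--         return 'Management'
--     elif any(word in career_lower for word in ['designer', 'creative', 'artist']):
--         return 'Design'
--     elif any(word in career_lower for word in ['consultant', 'advisor']):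
--         return 'Consulting'
--     else:
--         return 'General'
-- ===== SOURCE B (Python) =====
-- # Single left-to-right scan of the text: a naive multi-pattern matcher that, at each
-- # position, tries every keyword as a prefix and keeps the best (lowest-rank) category seen.
-- KEYWORDS = [
--     ('software', 0, 'Technology'), ('developer', 0, 'Technology'),
--     ('programmer', 0, 'Technology'), ('engineer', 0, 'Technology'),
--     ('data', 1, 'Data Science'), ('analyst', 1, 'Data Science'),
--     ('scientist', 1, 'Data Science'),
--     ('manager', 2, 'Management'), ('lead', 2, 'Management'),
--     ('director', 2, 'Management'),
--     ('designer', 3, 'Design'), ('creative', 3, 'Design'),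
--     ('artist', 3, 'Design'),
--     ('consultant', 4, 'Consulting'), ('advisor', 4, 'Consulting'),
-- ]
--
--
-- def get_career_field(career_name: str) -> str:
--     s = career_name.lower()
--     best_rank, best_field = 6, 'General'
--     for i in range(len(s)):
--         for kw, rank, field in KEYWORDS:
--             if rank < best_rank and s.startswith(kw, i):
--                 best_rank, best_field = rank, field
--     return best_field
-- ===== Notes on version B (the rewrite author's own statement) =====
-- stated objective: alternative
-- what changed: Replaces per-keyword substring membership tests in a fixed if-elif cascade by a single left-to-right scan of the lowercased text that tries every keyword as a prefix at each position (naive multi-pattern matching) and keeps the lowest-priority-rank category seen.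
import Mathlib
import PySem

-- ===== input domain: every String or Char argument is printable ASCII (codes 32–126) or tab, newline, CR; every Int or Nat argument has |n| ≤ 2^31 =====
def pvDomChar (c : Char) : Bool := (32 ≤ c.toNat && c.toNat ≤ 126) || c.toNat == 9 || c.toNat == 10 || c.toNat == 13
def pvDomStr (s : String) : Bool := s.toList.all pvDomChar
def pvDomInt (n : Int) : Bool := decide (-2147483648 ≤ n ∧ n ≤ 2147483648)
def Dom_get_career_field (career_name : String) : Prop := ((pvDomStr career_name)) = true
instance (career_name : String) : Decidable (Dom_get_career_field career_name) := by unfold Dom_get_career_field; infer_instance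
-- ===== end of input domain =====

-- B replaces A's per-keyword substring membership cascade by a single left-to-right scan of
-- the lowercased text that tries each keyword as a prefix at every position and keeps the
-- lowest-rank category seen (alternative algorithm, similar cost).

-- ===== PORT A =====
def get_career_field (career_name : String) : String :=
  let career_lower := PySem.Str.lower career_name
  if ["software", "developer", "programmer", "engineer"].any (fun word => PySem.Str.isIn word career_lower) then
    "Technology"
  else if ["data", "analyst", "scientist"].any (fun word => PySem.Str.isIn word career_lower) then
    "Data Science"
  else if ["manager", "lead", "director"].any (fun word => PySem.Str.isIn word career_lower) then
    "Management"
  else if ["designer", "creative", "artist"].any (fun word => PySem.Str.isIn word career_lower) then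
    "Design"
  else if ["consultant", "advisor"].any (fun word => PySem.Str.isIn word career_lower) then
    "Consulting"
  else
    "General"

-- ===== PORT B =====
def pvKeywords : List (List Char × Nat × String) :=
  [ ("software".toList, 0, "Technology"), ("developer".toList, 0, "Technology"),
    ("programmer".toList, 0, "Technology"), ("engineer".toList, 0, "Technology"),
    ("data".toList, 1, "Data Science"), ("analyst".toList, 1, "Data Science"),
    ("scientist".toList, 1, "Data Science"),
    ("manager".toList, 2, "Management"), ("lead".toList, 2, "Management"),
    ("director".toList, 2, "Management"),
    ("designer".toList, 3, "Design"), ("creative".toList, 3, "Design"),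
    ("artist".toList, 3, "Design"),
    ("consultant".toList, 4, "Consulting"), ("advisor".toList, 4, "Consulting") ]

-- the inner 'for kw, rank, field in KEYWORDS' loop at text position i;
-- s.startswith(kw, i) for 0 ≤ i is exact as 'kw is a prefix of s dropped by i'
def pvScanStep (s : List Char) (b : Nat × String) (i : Nat) : Nat × String :=
  pvKeywords.foldl
    (fun b t => if t.2.1 < b.1 ∧ PySem.Chars.startswith (s.drop i) t.1 then (t.2.1, t.2.2) else b) b

def get_career_field_alt (career_name : String) : String :=
  let s := (PySem.Str.lower career_name).toList
  ((List.range s.length).foldl (pvScanStep s) (6, "General")).2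

-- ===== PRECONDITION & SPEC =====
def Spec_get_career_field (career_name : String) (out : String) : Prop := out = get_career_field_alt career_name
instance (career_name : String) (out : String) : Decidable (Spec_get_career_field career_name out) := by unfold Spec_get_career_field; infer_instance

-- ===== CLAIM (what is proved, stated in full; the proofs are below) =====
def Claim_equal_get_career_field : Prop := ∀ (career_name : String), Dom_get_career_field career_name → Spec_get_career_field career_name (get_career_field career_name)

-- ===== LEMMAS AND PROOFS =====

-- rank-to-field table
def pvField : Nat → String
  | 0 => "Technology" | 1 => "Data Science" | 2 => "Management"
  | 3 => "Design" | 4 => "Consulting" | _ => "General"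

-- rank-only version of the inner scan step
def pvRankStep (s : List Char) (r : Nat) (i : Nat) : Nat :=
  pvKeywords.foldl
    (fun r t => if t.2.1 < r ∧ PySem.Chars.startswith (s.drop i) t.1 then t.2.1 else r) r

theorem pvKeywords_field (t : List Char × Nat × String) (ht : t ∈ pvKeywords) :
    t.2.2 = pvField t.2.1 := by
  fin_cases ht <;> rfl

-- pair fold = rank fold paired with the field table (generic over sublists of pvKeywords)
theorem pvScanStep_eq_rank_aux (s : List Char) (i : Nat)
    (K : List (List Char × Nat × String)) (hK : ∀ t ∈ K, t.2.2 = pvField t.2.1) (r : Nat) :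
    K.foldl (fun b t => if t.2.1 < b.1 ∧ PySem.Chars.startswith (s.drop i) t.1 then (t.2.1, t.2.2) else b) (r, pvField r)
    = (K.foldl (fun r t => if t.2.1 < r ∧ PySem.Chars.startswith (s.drop i) t.1 then t.2.1 else r) r,
       pvField (K.foldl (fun r t => if t.2.1 < r ∧ PySem.Chars.startswith (s.drop i) t.1 then t.2.1 else r) r)) := by
  induction K generalizing r with
  | nil => rfl
  | cons t K ih =>
    have hfield := hK t (List.mem_cons_self ..)
    simp only [List.foldl_cons]
    by_cases h : t.2.1 < r ∧ PySem.Chars.startswith (s.drop i) t.1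
    · simp only [if_pos h, hfield]
      exact ih (fun u hu => hK u (List.mem_cons_of_mem _ hu)) t.2.1
    · simp only [if_neg h]
      exact ih (fun u hu => hK u (List.mem_cons_of_mem _ hu)) r

theorem pvScanStep_eq_rank (s : List Char) (b r : Nat × String) (i : Nat) (hb : b = (r.1, pvField r.1)) :
    pvScanStep s b i = (pvRankStep s r.1 i, pvField (pvRankStep s r.1 i)) := by
  subst hb
  exact pvScanStep_eq_rank_aux s i pvKeywords pvKeywords_field r.1

theorem pvScan_eq_rank (s : List Char) (is : List Nat) (r : Nat) :
    is.foldl (pvScanStep s) (r, pvField r)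
    = (is.foldl (pvRankStep s) r, pvField (is.foldl (pvRankStep s) r)) := by
  induction is generalizing r with
  | nil => rfl
  | cons i is ih =>
    simp only [List.foldl_cons]
    rw [pvScanStep_eq_rank s _ (r, pvField r) i rfl]
    exact ih (pvRankStep s r i)

-- the rank fold never increases
theorem pvRankStep_le_aux (s : List Char) (i : Nat) (K : List (List Char × Nat × String)) (r : Nat) :
    K.foldl (fun r t => if t.2.1 < r ∧ PySem.Chars.startswith (s.drop i) t.1 then t.2.1 else r) r ≤ r := by
  induction K generalizing r with
  | nil => exact le_rfl
  | cons t K ih =>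
    simp only [List.foldl_cons]
    by_cases h : t.2.1 < r ∧ PySem.Chars.startswith (s.drop i) t.1
    · exact le_trans (by simpa [h] using ih t.2.1) (le_of_lt h.1)
    · simpa [h] using ih r

theorem pvRankStep_le (s : List Char) (r i : Nat) : pvRankStep s r i ≤ r :=
  pvRankStep_le_aux s i pvKeywords r

theorem pvRankFold_le (s : List Char) (is : List Nat) (r : Nat) :
    is.foldl (pvRankStep s) r ≤ r := by
  induction is generalizing r with
  | nil => exact le_rfl
  | cons i is ih =>
    simp only [List.foldl_cons]
    exact le_trans (ih (pvRankStep s r i)) (pvRankStep_le s r i)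

-- the result is the initial rank or the rank of some matching keyword
theorem pvRankStep_matched_aux (s : List Char) (i : Nat) (K : List (List Char × Nat × String)) (r : Nat) :
    K.foldl (fun r t => if t.2.1 < r ∧ PySem.Chars.startswith (s.drop i) t.1 then t.2.1 else r) r = r
    ∨ ∃ t ∈ K, PySem.Chars.startswith (s.drop i) t.1 = true
        ∧ t.2.1 = K.foldl (fun r t => if t.2.1 < r ∧ PySem.Chars.startswith (s.drop i) t.1 then t.2.1 else r) r := by
  induction K generalizing r with
  | nil => exact Or.inl rfl
  | cons t K ih =>
    simp only [List.foldl_cons]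
    by_cases h : t.2.1 < r ∧ PySem.Chars.startswith (s.drop i) t.1
    · simp only [if_pos h]
      rcases ih t.2.1 with heq | ⟨u, hu, hsw, heq⟩
      · exact Or.inr ⟨t, List.mem_cons_self .., h.2, heq.symm⟩
      · exact Or.inr ⟨u, List.mem_cons_of_mem _ hu, hsw, heq⟩
    · simp only [if_neg h]
      rcases ih r with heq | ⟨u, hu, hsw, heq⟩
      · exact Or.inl heq
      · exact Or.inr ⟨u, List.mem_cons_of_mem _ hu, hsw, heq⟩

theorem pvRankFold_matched (s : List Char) (is : List Nat) (r : Nat) :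
    is.foldl (pvRankStep s) r = r
    ∨ ∃ i ∈ is, ∃ t ∈ pvKeywords, PySem.Chars.startswith (s.drop i) t.1 = true
        ∧ t.2.1 = is.foldl (pvRankStep s) r := by
  induction is generalizing r with
  | nil => exact Or.inl rfl
  | cons i is ih =>
    simp only [List.foldl_cons]
    rcases ih (pvRankStep s r i) with heq | ⟨j, hj, u, hu, hsw, heq⟩
    · rw [heq]
      rcases pvRankStep_matched_aux s i pvKeywords r with heq2 | ⟨u, hu, hsw, heq2⟩
      · exact Or.inl heq2
      · exact Or.inr ⟨i, List.mem_cons_self .., u, hu, hsw, heq2⟩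
    · exact Or.inr ⟨j, List.mem_cons_of_mem _ hj, u, hu, hsw, heq⟩

-- the result is ≤ the rank of every keyword matching at a scanned position
theorem pvRankStep_min_aux (s : List Char) (i : Nat) (K : List (List Char × Nat × String)) (r : Nat) :
    ∀ t ∈ K, PySem.Chars.startswith (s.drop i) t.1 = true →
    K.foldl (fun r t => if t.2.1 < r ∧ PySem.Chars.startswith (s.drop i) t.1 then t.2.1 else r) r ≤ t.2.1 := by
  induction K generalizing r with
  | nil => intro t ht; cases ht
  | cons u K ih =>
    intro t ht hsw
    simp only [List.foldl_cons]
    rcases List.mem_cons.mp ht with rfl | htK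
    · by_cases h : t.2.1 < r ∧ PySem.Chars.startswith (s.drop i) t.1
      · simpa [h] using pvRankStep_le_aux s i K t.2.1
      · have hnlt : ¬ t.2.1 < r := fun hlt => h ⟨hlt, hsw⟩
        simp only [if_neg h]
        exact le_trans (pvRankStep_le_aux s i K r) (Nat.le_of_not_lt hnlt)
    · by_cases h : u.2.1 < r ∧ PySem.Chars.startswith (s.drop i) u.1
      · simpa [h] using ih u.2.1 t htK hsw
      · simpa [h] using ih r t htK hsw

theorem pvRankFold_min (s : List Char) (is : List Nat) (r : Nat) :
    ∀ i ∈ is, ∀ t ∈ pvKeywords, PySem.Chars.startswith (s.drop i) t.1 = true →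
    is.foldl (pvRankStep s) r ≤ t.2.1 := by
  induction is generalizing r with
  | nil => intro i hi; cases hi
  | cons j is ih =>
    intro i hi t ht hsw
    simp only [List.foldl_cons]
    rcases List.mem_cons.mp hi with rfl | his
    · exact le_trans (pvRankFold_le s is _) (pvRankStep_min_aux s i pvKeywords r t ht hsw)
    · exact ih (pvRankStep s r j) i his t ht hsw

-- a nonempty keyword that is a prefix of some suffix occurs at a position < length
theorem pvPrefix_drop_lt (s sub : List Char) (hne : sub ≠ []) (j : Nat) (h : sub <+: s.drop j) :
    j < s.length := by
  by_contra hge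
  have : s.drop j = [] := List.drop_eq_nil_of_le (Nat.le_of_not_lt hge)
  rw [this] at h
  exact hne (List.prefix_nil.mp h)

-- 'kw occurs at some scanned position' ↔ 'kw in s' (for nonempty kw)
theorem pvMatch_iff_isIn (s sub : List Char) (hne : sub ≠ []) :
    (∃ i ∈ List.range s.length, PySem.Chars.startswith (s.drop i) sub = true)
    ↔ PySem.Chars.isIn sub s = true := by
  constructor
  · rintro ⟨i, _, hsw⟩
    exact (PySem.Chars.exists_prefix_drop_iff_isIn _ _).mp ⟨i, (PySem.Chars.startswith_iff _ _).mp hsw⟩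
  · intro h
    obtain ⟨j, hj⟩ := (PySem.Chars.exists_prefix_drop_iff_isIn _ _).mpr h
    exact ⟨j, List.mem_range.mpr (pvPrefix_drop_lt s sub hne j hj), (PySem.Chars.startswith_iff _ _).mpr hj⟩

-- a rank achieved by some matched keyword forces the corresponding group membership
theorem pvMatched_group (l : List Char) (i : Nat)
    (t : List Char × Nat × String)
    (hsw : PySem.Chars.startswith (l.drop i) t.1 = true) :
    PySem.Chars.isIn t.1 l = true := by
  exact (PySem.Chars.exists_prefix_drop_iff_isIn _ _).mp ⟨i, (PySem.Chars.startswith_iff _ _).mp hsw⟩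

-- rank-to-keyword inventories of the table (used to refute achieved ranks)
theorem pvRank0 : ∀ t ∈ pvKeywords, t.2.1 = 0 →
    t.1 = "software".toList ∨ t.1 = "developer".toList ∨ t.1 = "programmer".toList ∨ t.1 = "engineer".toList := by decide
theorem pvRank1 : ∀ t ∈ pvKeywords, t.2.1 = 1 →
    t.1 = "data".toList ∨ t.1 = "analyst".toList ∨ t.1 = "scientist".toList := by decide
theorem pvRank2 : ∀ t ∈ pvKeywords, t.2.1 = 2 →
    t.1 = "manager".toList ∨ t.1 = "lead".toList ∨ t.1 = "director".toList := by decide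
theorem pvRank3 : ∀ t ∈ pvKeywords, t.2.1 = 3 →
    t.1 = "designer".toList ∨ t.1 = "creative".toList ∨ t.1 = "artist".toList := by decide
theorem pvRank4 : ∀ t ∈ pvKeywords, t.2.1 = 4 →
    t.1 = "consultant".toList ∨ t.1 = "advisor".toList := by decide
theorem pvRankLt5 : ∀ t ∈ pvKeywords, t.2.1 < 5 := by decide

-- ===== VERDICT (by name: the statement is the Claim_ definition above) =====
theorem get_career_field_spec : Claim_equal_get_career_field := by
  intro c _
  unfold Spec_get_career_field get_career_field get_career_field_alt
  set l := (PySem.Str.lower c).toList with hl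
  set R := (List.range l.length).foldl (pvRankStep l) 6 with hR
  have hfold : ((List.range l.length).foldl (pvScanStep l) (6, "General")).2 = pvField R := by
    have hG : ((6 : Nat), ("General" : String)) = ((6 : Nat), pvField 6) := rfl
    rw [hG, pvScan_eq_rank l (List.range l.length) 6, ← hR]
  rw [hfold]
  have hmem : ∀ t ∈ pvKeywords, t.1 ≠ [] := by decide
  have hle : ∀ t ∈ pvKeywords, PySem.Chars.isIn t.1 l = true → R ≤ t.2.1 := by
    intro t ht hin
    obtain ⟨i, hi, hsw⟩ := (pvMatch_iff_isIn l t.1 (hmem t ht)).mpr hin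
    exact pvRankFold_min l (List.range l.length) 6 i hi t ht hsw
  have hcases : R = 6 ∨ ∃ t ∈ pvKeywords, PySem.Chars.isIn t.1 l = true ∧ t.2.1 = R := by
    rcases pvRankFold_matched l (List.range l.length) 6 with heq | ⟨i, hi, t, ht, hsw, heq⟩
    · exact Or.inl heq
    · exact Or.inr ⟨t, ht, pvMatched_group l i t hsw, heq⟩
  simp only [List.any_cons, List.any_nil, Bool.or_false, PySem.Str.isIn_eq, ← hl]
  by_cases h0 : (PySem.Chars.isIn "software".toList l || (PySem.Chars.isIn "developer".toList l
      || (PySem.Chars.isIn "programmer".toList l || PySem.Chars.isIn "engineer".toList l))) = true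
  · have hR0 : R = 0 := by
      have hle0 : R ≤ 0 := by
        rcases Bool.or_eq_true_iff.mp h0 with h | h
        · exact hle ("software".toList, 0, "Technology") (by decide) h
        rcases Bool.or_eq_true_iff.mp h with h | h
        · exact hle ("developer".toList, 0, "Technology") (by decide) h
        rcases Bool.or_eq_true_iff.mp h with h | h
        · exact hle ("programmer".toList, 0, "Technology") (by decide) h
        · exact hle ("engineer".toList, 0, "Technology") (by decide) h
      omega
    rw [if_pos h0, hR0]; rfl
  · have hm0 := h0
    simp only [Bool.or_eq_true, not_or, Bool.not_eq_true] at hm0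
    have hn0 : R ≠ 0 := by
      intro hR0
      rcases hcases with h6 | ⟨t, ht, hin, hrk⟩
      · omega
      · rcases pvRank0 t ht (hrk.trans hR0) with h | h | h | h <;> rw [h] at hin
        · rw [hm0.1] at hin; exact Bool.false_ne_true hin
        · rw [hm0.2.1] at hin; exact Bool.false_ne_true hin
        · rw [hm0.2.2.1] at hin; exact Bool.false_ne_true hin
        · rw [hm0.2.2.2] at hin; exact Bool.false_ne_true hin
    rw [if_neg h0]
    by_cases h1 : (PySem.Chars.isIn "data".toList l || (PySem.Chars.isIn "analyst".toList l
        || PySem.Chars.isIn "scientist".toList l)) = true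
    · have hR1 : R = 1 := by
        have hle1 : R ≤ 1 := by
          rcases Bool.or_eq_true_iff.mp h1 with h | h
          · exact hle ("data".toList, 1, "Data Science") (by decide) h
          rcases Bool.or_eq_true_iff.mp h with h | h
          · exact hle ("analyst".toList, 1, "Data Science") (by decide) h
          · exact hle ("scientist".toList, 1, "Data Science") (by decide) h
        omega
      rw [if_pos h1, hR1]; rfl
    · have hm1 := h1
      simp only [Bool.or_eq_true, not_or, Bool.not_eq_true] at hm1
      have hn1 : R ≠ 1 := by
        intro hR1
        rcases hcases with h6 | ⟨t, ht, hin, hrk⟩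
        · omega
        · rcases pvRank1 t ht (hrk.trans hR1) with h | h | h <;> rw [h] at hin
          · rw [hm1.1] at hin; exact Bool.false_ne_true hin
          · rw [hm1.2.1] at hin; exact Bool.false_ne_true hin
          · rw [hm1.2.2] at hin; exact Bool.false_ne_true hin
      rw [if_neg h1]
      by_cases h2 : (PySem.Chars.isIn "manager".toList l || (PySem.Chars.isIn "lead".toList l
          || PySem.Chars.isIn "director".toList l)) = true
      · have hR2 : R = 2 := by
          have hle2 : R ≤ 2 := by
            rcases Bool.or_eq_true_iff.mp h2 with h | h
            · exact hle ("manager".toList, 2, "Management") (by decide) h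
            rcases Bool.or_eq_true_iff.mp h with h | h
            · exact hle ("lead".toList, 2, "Management") (by decide) h
            · exact hle ("director".toList, 2, "Management") (by decide) h
          omega
        rw [if_pos h2, hR2]; rfl
      · have hm2 := h2
        simp only [Bool.or_eq_true, not_or, Bool.not_eq_true] at hm2
        have hn2 : R ≠ 2 := by
          intro hR2
          rcases hcases with h6 | ⟨t, ht, hin, hrk⟩
          · omega
          · rcases pvRank2 t ht (hrk.trans hR2) with h | h | h <;> rw [h] at hin
            · rw [hm2.1] at hin; exact Bool.false_ne_true hin
            · rw [hm2.2.1] at hin; exact Bool.false_ne_true hin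
            · rw [hm2.2.2] at hin; exact Bool.false_ne_true hin
        rw [if_neg h2]
        by_cases h3 : (PySem.Chars.isIn "designer".toList l || (PySem.Chars.isIn "creative".toList l
            || PySem.Chars.isIn "artist".toList l)) = true
        · have hR3 : R = 3 := by
            have hle3 : R ≤ 3 := by
              rcases Bool.or_eq_true_iff.mp h3 with h | h
              · exact hle ("designer".toList, 3, "Design") (by decide) h
              rcases Bool.or_eq_true_iff.mp h with h | h
              · exact hle ("creative".toList, 3, "Design") (by decide) h
              · exact hle ("artist".toList, 3, "Design") (by decide) h
            omega
          rw [if_pos h3, hR3]; rfl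
        · have hm3 := h3
          simp only [Bool.or_eq_true, not_or, Bool.not_eq_true] at hm3
          have hn3 : R ≠ 3 := by
            intro hR3
            rcases hcases with h6 | ⟨t, ht, hin, hrk⟩
            · omega
            · rcases pvRank3 t ht (hrk.trans hR3) with h | h | h <;> rw [h] at hin
              · rw [hm3.1] at hin; exact Bool.false_ne_true hin
              · rw [hm3.2.1] at hin; exact Bool.false_ne_true hin
              · rw [hm3.2.2] at hin; exact Bool.false_ne_true hin
          rw [if_neg h3]
          by_cases h4 : (PySem.Chars.isIn "consultant".toList l || PySem.Chars.isIn "advisor".toList l) = true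
          · have hR4 : R = 4 := by
              have hle4 : R ≤ 4 := by
                rcases Bool.or_eq_true_iff.mp h4 with h | h
                · exact hle ("consultant".toList, 4, "Consulting") (by decide) h
                · exact hle ("advisor".toList, 4, "Consulting") (by decide) h
              omega
            rw [if_pos h4, hR4]; rfl
          · have hm4 := h4
            simp only [Bool.or_eq_true, not_or, Bool.not_eq_true] at hm4
            have hn4 : R ≠ 4 := by
              intro hR4
              rcases hcases with h6 | ⟨t, ht, hin, hrk⟩
              · omega
              · rcases pvRank4 t ht (hrk.trans hR4) with h | h <;> rw [h] at hin
                · rw [hm4.1] at hin; exact Bool.false_ne_true hin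
                · rw [hm4.2] at hin; exact Bool.false_ne_true hin
            rw [if_neg h4]
            have hR6 : R = 6 := by
              rcases hcases with h6 | ⟨t, ht, hin, hrk⟩
              · exact h6
              · have := pvRankLt5 t ht
                omega
            rw [hR6]; rfl
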